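-- pv_equiv track=rewrite | github.com/MissKessa/fi-2022 | Python/Python V. Problem 18.py | interior_line
-- ===== SOURCE A (Python) =====
-- def interior_line(ch, n):
--     """Returns a string with n characters ch only in the borders"""
--     result=""
--     for j in range (0,n,1):
--         if j==0 or j==n-1:
--             result+=ch
--         else:
--             result+=" "
--     return result
-- ===== SOURCE B (Python) =====
-- def interior_line(ch, n):
--     """Returns a string with n characters ch only in the borders"""
--     if n <= 0:
--         return ""
--     if n == 1:
--         return "" + ch
--     return ch + " " * (n - 2) + ch
-- ===== Notes on version B (the rewrite author's own statement) =====
-- stated objective: simpler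
-- what changed: Replaces the per-index loop with branches by a closed-form construction: n<=0 gives "", n==1 gives the single border char, otherwise ch + " "*(n-2) + ch via string replication.
import Mathlib
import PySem

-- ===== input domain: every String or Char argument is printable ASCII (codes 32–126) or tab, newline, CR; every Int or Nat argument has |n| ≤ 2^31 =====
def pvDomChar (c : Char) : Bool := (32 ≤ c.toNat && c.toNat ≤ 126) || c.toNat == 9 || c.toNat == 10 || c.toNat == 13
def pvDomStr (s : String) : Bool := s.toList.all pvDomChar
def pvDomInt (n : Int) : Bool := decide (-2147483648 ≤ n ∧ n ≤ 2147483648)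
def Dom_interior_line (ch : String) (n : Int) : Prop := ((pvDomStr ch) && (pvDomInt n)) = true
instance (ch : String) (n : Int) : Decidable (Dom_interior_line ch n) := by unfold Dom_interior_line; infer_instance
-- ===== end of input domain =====

-- B replaces A's per-index loop with a closed-form construction (same cost, simpler).

-- ===== PORT A =====
def interior_line (ch : String) (n : Int) : String :=
  (PySem.List.pyRange 0 n 1).foldl
    (fun result j => if j = 0 ∨ j = n - 1 then result ++ ch else result ++ " ") ""

-- ===== PORT B =====
def interior_line_alt (ch : String) (n : Int) : String :=
  if n ≤ 0 then ""
  else if n = 1 then "" ++ ch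
  else ch ++ String.ofList (List.replicate (n - 2).toNat ' ') ++ ch

-- ===== PRECONDITION & SPEC =====
def Spec_interior_line (ch : String) (n : Int) (out : String) : Prop := out = interior_line_alt ch n
instance (ch : String) (n : Int) (out : String) : Decidable (Spec_interior_line ch n out) := by unfold Spec_interior_line; infer_instance

-- ===== CLAIM (what is proved, stated in full; the proofs are below) =====
def Claim_equal_interior_line : Prop := ∀ (ch : String) (n : Int), Dom_interior_line ch n → Spec_interior_line ch n (interior_line ch n)

-- ===== LEMMAS AND PROOFS =====

-- The interior of the loop (indices 1 .. n-2) only ever appends spaces.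
theorem interior_line_mid (ch : String) (n : Int) :
    ∀ (m : Nat) (a : Int) (acc : String), 1 ≤ a → a + m ≤ n - 1 →
      (PySem.List.pyRange a (a + m) 1).foldl
        (fun result j => if j = 0 ∨ j = n - 1 then result ++ ch else result ++ " ") acc
      = acc ++ String.ofList (List.replicate m ' ') := by
  intro m
  induction m with
  | zero =>
    intro a acc _ _
    rw [show a + (0 : Nat) = a by push_cast; ring, PySem.List.pyRange_one_eq_nil le_rfl]
    apply String.toList_inj.mp
    simp [String.toList_append]
  | succ k ih =>
    intro a acc ha hb
    have hlt : a < a + (k + 1 : Nat) := by push_cast; omega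
    rw [PySem.List.pyRange_one_cons hlt]
    have hne : ¬ (a = 0 ∨ a = n - 1) := by push_cast at hb; omega
    simp only [List.foldl_cons, if_neg hne]
    have : a + (k + 1 : Nat) = (a + 1) + (k : Nat) := by push_cast; ring
    rw [this, ih (a + 1) (acc ++ " ") (by omega) (by push_cast at hb ⊢; omega)]
    apply String.toList_inj.mp
    simp [String.toList_append, List.replicate_succ]

theorem interior_line_eq (ch : String) (n : Int) :
    interior_line ch n = interior_line_alt ch n := by
  unfold interior_line interior_line_alt
  by_cases h0 : n ≤ 0
  · rw [PySem.List.pyRange_one_eq_nil h0, if_pos h0]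
    rfl
  · rw [if_neg h0]
    by_cases h1 : n = 1
    · subst h1
      rw [PySem.List.pyRange_one_cons (by norm_num : (0:Int) < 1),
          PySem.List.pyRange_one_eq_nil (by norm_num : (1:Int) ≤ 0 + 1)]
      simp
    · rw [if_neg h1]
      have h2 : 2 ≤ n := by omega
      rw [PySem.List.pyRange_one_cons (by omega : (0:Int) < n),
          show (0:Int) + 1 = 1 by norm_num,
          PySem.List.pyRange_one_append 1 (n - 1) n (by omega) (by omega),
          show PySem.List.pyRange 1 (n - 1) 1
            = PySem.List.pyRange 1 (1 + ((n - 2).toNat : Nat)) 1 by congr 1; omega,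
          PySem.List.pyRange_one_cons (by omega : n - 1 < n),
          show n - 1 + 1 = n by ring,
          PySem.List.pyRange_one_eq_nil (le_refl n)]
      simp only [List.foldl_cons, List.foldl_append, List.foldl_nil,
        eq_self_iff_true, true_or, or_true, if_true]
      rw [interior_line_mid ch n (n - 2).toNat 1 ("" ++ ch) (by omega) (by omega)]
      apply String.toList_inj.mp
      simp [String.toList_append]

-- ===== VERDICT (by name: the statement is the Claim_ definition above) =====
theorem interior_line_spec : Claim_equal_interior_line := by
  intro ch n _
  exact interior_line_eq ch n
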